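-- pv_equiv track=rewrite | github.com/pypi-data/pypi-mirror-297 | packages/pqcomponents/pqcomponents-1.0.14.tar.gz/pqcomponents-1.0.14/pqcomponents/PQBluetoothctl.py | parse_device_info
-- ===== SOURCE A (Python) =====
-- def parse_device_info(info_string):
--     """Parse a string corresponding to a device."""
--     device = {}
--     block_list = ["[\x1b[0;", "removed"]
--     string_valid = not any(keyword in info_string for keyword in block_list)
--
--     if string_valid:
--         try:
--             device_position = info_string.index("Device")
--         except ValueError:
--             pass
--         else:
--             if device_position > -1:
--                 attribute_list = info_string[device_position:].split(" ", 2)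
--                 if len(attribute_list) == 3:  # list의 항목이 3 이하일 경우 out of range Err때문에 길이 비교가 필요함
--                     device = {
--                         "mac_address": attribute_list[1],
--                         "name": attribute_list[2]
--                     }
--     return device
-- ===== SOURCE B (Python) =====
-- def parse_device_info(info_string):
--     """Parse a string corresponding to a device."""
--     if any(keyword in info_string for keyword in ("[\x1b[0;", "removed")):
--         return {}
--     tokens = info_string.split(" ")
--     for j, tok in enumerate(tokens):
--         if "Device" in tok:
--             if j + 2 < len(tokens):
--                 return {"mac_address": tokens[j + 1],
--                         "name": " ".join(tokens[j + 2:])}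
--             return {}
--     return {}
-- ===== Notes on version B (the rewrite author's own statement) =====
-- stated objective: alternative
-- what changed: Instead of locating 'Device' by substring index, slicing, and a maxsplit-2 split, B tokenizes the whole string on spaces once, scans the token list for the first token containing 'Device', and rebuilds the name by joining the remaining tokens.
import Mathlib
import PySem

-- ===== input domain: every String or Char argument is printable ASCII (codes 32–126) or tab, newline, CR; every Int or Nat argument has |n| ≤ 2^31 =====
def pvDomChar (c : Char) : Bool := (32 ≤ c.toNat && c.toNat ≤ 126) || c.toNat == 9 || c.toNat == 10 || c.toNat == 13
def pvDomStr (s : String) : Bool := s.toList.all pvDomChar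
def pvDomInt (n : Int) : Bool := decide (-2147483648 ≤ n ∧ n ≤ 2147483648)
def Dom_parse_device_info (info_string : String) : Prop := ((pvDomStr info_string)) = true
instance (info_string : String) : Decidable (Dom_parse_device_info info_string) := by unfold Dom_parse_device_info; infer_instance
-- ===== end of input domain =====

-- B tokenizes the whole string on spaces once and scans the token list for the
-- first token containing "Device", joining the remaining tokens back for the
-- name — instead of A's substring-index / slice / maxsplit-2 split (alternative,
-- same cost; equal return value on every input).

-- ===== PORT A =====
def parse_device_info (info_string : String) : List (String × String) :=
  let l := info_string.toList
  let block_list : List (List Char) := ["[\x1b[0;".toList, "removed".toList]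
  let string_valid := !(block_list.any (fun keyword => PySem.Chars.isIn keyword l))
  if string_valid then
    let device_position := PySem.Chars.find l "Device".toList
    if device_position = -1 then []   -- index() raised ValueError → pass
    else if device_position > -1 then
      let attribute_list := PySem.Chars.splitOnMax (l.drop device_position.toNat) [' '] 2
      if attribute_list.length = 3 then
        [("mac_address", String.ofList (attribute_list.getD 1 [])),
         ("name", String.ofList (attribute_list.getD 2 []))]
      else []
    else []
  else []

-- ===== PORT B =====
-- the 'for j, tok in enumerate(tokens)' loop of Source B as structural recursion:
-- first token containing "Device"; tokens[j+1] / " ".join(tokens[j+2:]) are the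
-- head and joined tail of the remaining list.
def pvScanTokens (tokens : List (List Char)) : List (String × String) :=
  match tokens with
  | [] => []
  | tok :: rest =>
    if PySem.Chars.isIn "Device".toList tok then
      match rest with
      | mac :: r2 :: more =>
        [("mac_address", String.ofList mac),
         ("name", String.ofList (PySem.Chars.join [' '] (r2 :: more)))]
      | _ => []
    else pvScanTokens rest

def parse_device_info_alt (info_string : String) : List (String × String) :=
  let l := info_string.toList
  if PySem.Chars.isIn "[\x1b[0;".toList l || PySem.Chars.isIn "removed".toList l then []
  else pvScanTokens (PySem.Chars.splitOn l [' '])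

-- ===== PRECONDITION & SPEC =====
def Spec_parse_device_info (info_string : String) (out : List (String × String)) : Prop := out = parse_device_info_alt info_string
instance (info_string : String) (out : List (String × String)) : Decidable (Spec_parse_device_info info_string out) := by unfold Spec_parse_device_info; infer_instance

-- ===== CLAIM (what is proved, stated in full; the proofs are below) =====
def Claim_equal_parse_device_info : Prop := ∀ (info_string : String), Dom_parse_device_info info_string → Spec_parse_device_info info_string (parse_device_info info_string)

-- ===== LEMMAS AND PROOFS =====

-- A's computation after the blocklist guard, as a function of the char list
def pvAcore (l : List Char) : List (String × String) :=
  if PySem.Chars.find l "Device".toList = -1 then []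
  else if PySem.Chars.find l "Device".toList > -1 then
    if (PySem.Chars.splitOnMax (l.drop (PySem.Chars.find l "Device".toList).toNat) [' '] 2).length = 3 then
      [("mac_address", String.ofList
          ((PySem.Chars.splitOnMax (l.drop (PySem.Chars.find l "Device".toList).toNat) [' '] 2).getD 1 [])),
       ("name", String.ofList
          ((PySem.Chars.splitOnMax (l.drop (PySem.Chars.find l "Device".toList).toNat) [' '] 2).getD 2 []))]
    else []
  else []

-- the first element surviving dropWhile fails the predicate
theorem dropWhile_head_false {α : Type} (p : α → Bool) (l : List α) (c : α) (u : List α)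
    (h : l.dropWhile p = c :: u) : p c = false := by
  induction l with
  | nil => simp at h
  | cons x xs ih =>
    by_cases hx : p x
    · rw [List.dropWhile_cons_of_pos hx] at h; exact ih h
    · rw [List.dropWhile_cons_of_neg hx] at h
      cases h; simpa using hx

-- every list of chars either has no space or splits at the first one
theorem space_decomp (t : List Char) :
    ' ' ∉ t ∨ ∃ a r, t = a ++ ' ' :: r ∧ ' ' ∉ a := by
  by_cases h : ' ' ∈ t
  · right
    refine ⟨t.takeWhile (· ≠ ' '), (t.dropWhile (· ≠ ' ')).tail, ?_, ?_⟩
    · have hne : t.dropWhile (· ≠ ' ') ≠ [] := by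
        intro hnil
        have := List.mem_takeWhile_imp (l := t) (p := (· ≠ ' '))
          (by rw [← List.takeWhile_append_dropWhile (p := (· ≠ ' ')) (l := t), hnil,
                List.append_nil] at h; exact h)
        simp at this
      obtain ⟨c, u, hcu⟩ := List.exists_cons_of_ne_nil hne
      have hc : c = ' ' := by
        have := dropWhile_head_false _ t c u hcu
        simpa using this
      conv_lhs => rw [← List.takeWhile_append_dropWhile (p := (· ≠ ' ')) (l := t)]
      rw [hcu, hc]
      simp
    · intro hmem
      have := List.mem_takeWhile_imp hmem
      simp at this
  · left; exact h

-- splitOnMax.go on a spaceless list returns the accumulated result (any m)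
theorem go_no_space (fuel m : Nat) (l cur : List Char) (acc : List (List Char))
    (hf : l.length < fuel) (h : ' ' ∉ l) :
    PySem.Chars.splitOnMax.go [' '] fuel m l cur acc
      = ((cur.reverse ++ l) :: acc).reverse := by
  induction fuel generalizing l cur with
  | zero => omega
  | succ n ih =>
    cases l with
    | nil => simp [PySem.Chars.splitOnMax.go]
    | cons c rest =>
      have hc : ¬ ([' '] : List Char).isPrefixOf (c :: rest) := by
        simp only [List.isPrefixOf_cons₂, List.isPrefixOf_nil_left, Bool.and_true]
        intro hcc
        exact h (by simp; exact Or.inl (eq_of_beq hcc))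
      by_cases hm : m = 0
      · simp [PySem.Chars.splitOnMax.go, hm]
      · simp only [PySem.Chars.splitOnMax.go, if_neg hm, if_neg hc]
        rw [ih rest (c :: cur) (by simp at hf ⊢; omega) (fun hx => h (List.mem_cons_of_mem _ hx))]
        simp

-- splitOnMax.go with m = 0 returns immediately
theorem go_zero (fuel : Nat) (l cur : List Char) (acc : List (List Char)) :
    PySem.Chars.splitOnMax.go [' '] fuel 0 l cur acc
      = ((cur.reverse ++ l) :: acc).reverse := by
  cases fuel with
  | zero => simp [PySem.Chars.splitOnMax.go]
  | succ n => cases l with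
    | nil => simp [PySem.Chars.splitOnMax.go]
    | cons c rest => simp [PySem.Chars.splitOnMax.go]

-- splitOnMax.go steps over a spaceless prefix followed by a space (m > 0)
theorem go_step (m : Nat) (pre s cur : List Char) (acc : List (List Char))
    (hm : 0 < m) (hpre : ' ' ∉ pre) :
    PySem.Chars.splitOnMax.go [' '] ((pre ++ ' ' :: s).length + 1) m (pre ++ ' ' :: s) cur acc
      = PySem.Chars.splitOnMax.go [' '] (s.length + 1) (m - 1) s [] ((cur.reverse ++ pre) :: acc) := by
  induction pre generalizing cur with
  | nil =>
    simp only [List.nil_append, List.length_cons, PySem.Chars.splitOnMax.go]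
    rw [if_neg (by omega), if_pos (by simp)]
    simp
  | cons c pre' ih =>
    have hc : ¬ ([' '] : List Char).isPrefixOf (c :: (pre' ++ ' ' :: s)) := by
      simp only [List.isPrefixOf_cons₂, List.isPrefixOf_nil_left, Bool.and_true]
      intro hcc
      exact hpre (by simp; exact Or.inl (eq_of_beq hcc))
    simp only [List.cons_append, List.length_cons, PySem.Chars.splitOnMax.go]
    rw [if_neg (by omega), if_neg hc]
    rw [ih (c :: cur) (fun hx => hpre (List.mem_cons_of_mem _ hx))]
    simp

-- the three shapes of split(" ", 2) on pre ++ s with pre spaceless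
theorem splitOnMax_one (pre s : List Char) (hpre : ' ' ∉ pre) (hs : ' ' ∉ s) :
    PySem.Chars.splitOnMax (pre ++ s) [' '] 2 = [pre ++ s] := by
  simp only [PySem.Chars.splitOnMax]
  rw [if_neg (by omega), show (Int.toNat 2) = 2 from rfl]
  rw [go_no_space _ 2 _ _ _ (by omega) (by intro h; rcases List.mem_append.mp h with h | h
                                           exacts [hpre h, hs h])]
  simp

theorem splitOnMax_two (pre a r : List Char) (hpre : ' ' ∉ pre) (ha : ' ' ∉ a) (hr : ' ' ∉ r) :
    PySem.Chars.splitOnMax (pre ++ (a ++ ' ' :: r)) [' '] 2 = [pre ++ a, r] := by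
  simp only [PySem.Chars.splitOnMax]
  rw [if_neg (by omega), show (Int.toNat 2) = 2 from rfl, ← List.append_assoc]
  have hpa : ' ' ∉ pre ++ a := by
    intro h; rcases List.mem_append.mp h with h | h; exacts [hpre h, ha h]
  rw [go_step 2 (pre ++ a) r [] [] (by omega) hpa]
  rw [go_no_space _ 1 _ _ _ (by omega) hr]
  simp

theorem splitOnMax_three (pre a b r2 : List Char) (hpre : ' ' ∉ pre) (ha : ' ' ∉ a) (hb : ' ' ∉ b) :
    PySem.Chars.splitOnMax (pre ++ (a ++ ' ' :: (b ++ ' ' :: r2))) [' '] 2 = [pre ++ a, b, r2] := by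
  simp only [PySem.Chars.splitOnMax]
  rw [if_neg (by omega), show (Int.toNat 2) = 2 from rfl, ← List.append_assoc]
  have hpa : ' ' ∉ pre ++ a := by
    intro h; rcases List.mem_append.mp h with h | h; exacts [hpre h, ha h]
  rw [go_step 2 (pre ++ a) (b ++ ' ' :: r2) [] [] (by omega) hpa]
  rw [go_step 1 b r2 [] _ (by omega) hb]
  rw [go_zero]
  simp

-- "Device" has no space
theorem dev_no_space : ' ' ∉ "Device".toList := by decide

-- l.drop i = "Device" ++ l.drop (i+6) once "Device" is a prefix of l.drop i
theorem tail_eq (i : Nat) (l : List Char) (hpre : "Device".toList <+: l.drop i) :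
    l.drop i = "Device".toList ++ l.drop (i + 6) := by
  obtain ⟨tl, htl⟩ := hpre
  have : l.drop (i + 6) = tl := by
    have : (l.drop i).drop 6 = tl := by rw [← htl]; rfl
    rwa [List.drop_drop] at this
  rw [this, htl]

-- ===== splitOn / join lemmas =====

-- splitOn.go on a spaceless list
theorem sgo_no_space (fuel : Nat) (l cur : List Char) (acc : List (List Char))
    (hf : l.length < fuel) (h : ' ' ∉ l) :
    PySem.Chars.splitOn.go [' '] fuel l cur acc
      = ((cur.reverse ++ l) :: acc).reverse := by
  induction fuel generalizing l cur with
  | zero => omega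
  | succ n ih =>
    cases l with
    | nil => simp [PySem.Chars.splitOn.go]
    | cons c rest =>
      have hc : ¬ ([' '] : List Char).isPrefixOf (c :: rest) := by
        simp only [List.isPrefixOf_cons₂, List.isPrefixOf_nil_left, Bool.and_true]
        intro hcc
        exact h (by simp; exact Or.inl (eq_of_beq hcc))
      simp only [PySem.Chars.splitOn.go, if_neg hc]
      rw [ih rest (c :: cur) (by simp at hf ⊢; omega) (fun hx => h (List.mem_cons_of_mem _ hx))]
      simp

-- splitOn.go steps over a spaceless prefix followed by a space
theorem sgo_step (pre s cur : List Char) (acc : List (List Char)) (hpre : ' ' ∉ pre) :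
    PySem.Chars.splitOn.go [' '] ((pre ++ ' ' :: s).length + 1) (pre ++ ' ' :: s) cur acc
      = PySem.Chars.splitOn.go [' '] (s.length + 1) s [] ((cur.reverse ++ pre) :: acc) := by
  induction pre generalizing cur with
  | nil =>
    simp only [List.nil_append, List.length_cons, PySem.Chars.splitOn.go]
    rw [if_pos (by simp)]
    simp
  | cons c pre' ih =>
    have hc : ¬ ([' '] : List Char).isPrefixOf (c :: (pre' ++ ' ' :: s)) := by
      simp only [List.isPrefixOf_cons₂, List.isPrefixOf_nil_left, Bool.and_true]
      intro hcc
      exact hpre (by simp; exact Or.inl (eq_of_beq hcc))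
    simp only [List.cons_append, List.length_cons, PySem.Chars.splitOn.go]
    rw [if_neg hc]
    rw [ih (c :: cur) (fun hx => hpre (List.mem_cons_of_mem _ hx))]
    simp

-- splitOn.go splits its accumulator off
theorem sgo_acc (fuel : Nat) (l cur : List Char) (acc : List (List Char)) :
    PySem.Chars.splitOn.go [' '] fuel l cur acc
      = acc.reverse ++ PySem.Chars.splitOn.go [' '] fuel l cur [] := by
  induction fuel generalizing l cur acc with
  | zero => simp [PySem.Chars.splitOn.go]
  | succ n ih =>
    cases l with
    | nil => simp [PySem.Chars.splitOn.go]
    | cons c rest =>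
      by_cases hc : ([' '] : List Char).isPrefixOf (c :: rest)
      · simp only [PySem.Chars.splitOn.go, if_pos hc]
        rw [ih _ _ (cur.reverse :: acc), ih _ _ [cur.reverse]]
        simp
      · simp only [PySem.Chars.splitOn.go, if_neg hc]
        exact ih _ _ _

theorem splitOn_no_space (l : List Char) (h : ' ' ∉ l) :
    PySem.Chars.splitOn l [' '] = [l] := by
  unfold PySem.Chars.splitOn
  rw [sgo_no_space _ _ _ _ (by omega) h]
  simp

theorem splitOn_cons (a r : List Char) (ha : ' ' ∉ a) :
    PySem.Chars.splitOn (a ++ ' ' :: r) [' '] = a :: PySem.Chars.splitOn r [' '] := by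
  unfold PySem.Chars.splitOn
  rw [sgo_step a r [] [] ha, sgo_acc]
  simp

-- splitOn is never empty and joining it back with " " is the identity
theorem join_splitOn_aux (n : Nat) : ∀ l : List Char, l.length ≤ n →
    PySem.Chars.splitOn l [' '] ≠ [] ∧
      PySem.Chars.join [' '] (PySem.Chars.splitOn l [' ']) = l := by
  induction n with
  | zero =>
    intro l hl
    have : l = [] := List.eq_nil_of_length_eq_zero (by omega)
    subst this
    refine ⟨by simp [splitOn_no_space [] (by simp)], ?_⟩
    rw [splitOn_no_space [] (by simp)]
    simp [PySem.Chars.join_singleton]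
  | succ n ih =>
    intro l hl
    rcases space_decomp l with hns | ⟨a, r, rfl, ha⟩
    · rw [splitOn_no_space l hns]
      exact ⟨by simp, by simp [PySem.Chars.join_singleton]⟩
    · rw [splitOn_cons a r ha]
      have hr : r.length ≤ n := by
        have := hl; simp at this; omega
      obtain ⟨hne, hjoin⟩ := ih r hr
      refine ⟨by simp, ?_⟩
      obtain ⟨x, xs, hx⟩ := List.exists_cons_of_ne_nil hne
      rw [hx] at hjoin ⊢
      rw [PySem.Chars.join_cons_cons, hjoin]
      simp

-- ===== find-transfer lemmas =====

-- a prefix shorter than the first summand is a prefix of it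
theorem prefix_append_of_le (p x y : List Char) (h : p <+: x ++ y)
    (hlen : p.length ≤ x.length) : p <+: x := by
  rw [List.prefix_iff_eq_take, List.take_append_of_le_length hlen] at h
  rw [h]
  exact List.take_prefix _ _

-- "Device" cannot start in a within 6 of the boundary space
theorem no_straddle (a r : List Char) (_ha : ' ' ∉ a) (j : Nat)
    (hj : j ≤ a.length) (hj6 : a.length < j + 6) :
    ¬ "Device".toList <+: (a ++ ' ' :: r).drop j := by
  intro hpre
  rw [List.drop_append_of_le_length hj] at hpre
  obtain ⟨tl, htl⟩ := hpre
  have hm : a.length - j < ("Device".toList ++ tl).length := by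
    rw [htl]
    simp only [List.length_append, List.length_drop, List.length_cons]
    omega
  have h1 : ("Device".toList ++ tl)[a.length - j]'hm = ' ' := by
    simp only [htl]
    rw [List.getElem_append_right (by simp only [List.length_drop]; omega)]
    simp
  have hlt : a.length - j < ("Device".toList).length := by
    have h6 : ("Device".toList).length = 6 := by decide
    omega
  rw [List.getElem_append_left hlt] at h1
  exact dev_no_space (h1 ▸ List.getElem_mem _)

-- occurrences within a transfer down
theorem prefix_down (a r : List Char) (j : Nat) (hj : j + 6 ≤ a.length)
    (h : "Device".toList <+: (a ++ ' ' :: r).drop j) : "Device".toList <+: a.drop j := by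
  rw [List.drop_append_of_le_length (by omega)] at h
  exact prefix_append_of_le _ _ _ h (by simp; omega)

-- occurrences within a transfer up
theorem prefix_up (a r : List Char) (j : Nat) (hj : j ≤ a.length)
    (h : "Device".toList <+: a.drop j) : "Device".toList <+: (a ++ ' ' :: r).drop j := by
  rw [List.drop_append_of_le_length hj]
  exact h.trans (List.prefix_append _ _)

-- drop past the separator
theorem drop_past (a r : List Char) (k : Nat) :
    (a ++ ' ' :: r).drop (a.length + 1 + k) = r.drop k := by
  rw [List.drop_append, List.drop_eq_nil_of_le (by omega)]
  simp [show a.length + 1 + k - a.length = k + 1 by omega]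

-- a prefix of a drop is an infix of the whole list
theorem prefix_drop_infix (s sub : List Char) (j : Nat) (h : sub <+: s.drop j) :
    sub <:+: s :=
  h.isInfix.trans (List.drop_suffix j s).isInfix

-- find characterisation: value with occurrence + minimality
theorem find_eq_of (s sub : List Char) (v : Nat)
    (hocc : sub <+: s.drop v) (hmin : ∀ i < v, ¬ sub <+: s.drop i) :
    PySem.Chars.find s sub = (v : Int) := by
  have hinf : sub <:+: s := prefix_drop_infix s sub v hocc
  have hnn : 0 ≤ PySem.Chars.find s sub := (PySem.Chars.find_nonneg_iff _ _).mpr hinf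
  obtain ⟨hpre, hmin'⟩ := PySem.Chars.find_spec (s := s) (sub := sub) hnn
  set k := (PySem.Chars.find s sub).toNat with hk
  have h1 : ¬ k < v := fun hlt => hmin k hlt hpre
  have h2 : ¬ v < k := fun hlt => hmin' v hlt hocc
  omega

-- if "Device" occurs in a, find over a ++ ' ' :: r equals find over a
theorem find_left (a r : List Char) (_ha : ' ' ∉ a) (hDa : "Device".toList <:+: a) :
    PySem.Chars.find (a ++ ' ' :: r) "Device".toList = PySem.Chars.find a "Device".toList := by
  have hnn : 0 ≤ PySem.Chars.find a "Device".toList :=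
    (PySem.Chars.find_nonneg_iff _ _).mpr hDa
  obtain ⟨hpre, hmin⟩ := PySem.Chars.find_spec (s := a) (sub := "Device".toList) hnn
  set ia := (PySem.Chars.find a "Device".toList).toNat with hia
  have hia6 : ia + 6 ≤ a.length := by
    have := hpre.length_le
    simp at this
    omega
  rw [find_eq_of (a ++ ' ' :: r) "Device".toList ia
    (prefix_up a r ia (by omega) hpre)
    (fun i hi hp => hmin i hi (prefix_down a r i (by omega) hp))]
  omega

-- if "Device" does not occur in a but occurs in r, find shifts by |a| + 1
theorem find_right (a r : List Char) (ha : ' ' ∉ a) (hDa : ¬ "Device".toList <:+: a)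
    (hDr : "Device".toList <:+: r) :
    PySem.Chars.find (a ++ ' ' :: r) "Device".toList
      = (a.length : Int) + 1 + PySem.Chars.find r "Device".toList := by
  have hnn : 0 ≤ PySem.Chars.find r "Device".toList :=
    (PySem.Chars.find_nonneg_iff _ _).mpr hDr
  obtain ⟨hpre, hmin⟩ := PySem.Chars.find_spec (s := r) (sub := "Device".toList) hnn
  set ir := (PySem.Chars.find r "Device".toList).toNat with hir
  have hDa' : ∀ j, ¬ "Device".toList <+: a.drop j :=
    fun j hp => hDa (prefix_drop_infix a _ j hp)
  have hocc : "Device".toList <+: (a ++ ' ' :: r).drop (a.length + 1 + ir) := by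
    rw [drop_past]; exact hpre
  have hminL : ∀ i < a.length + 1 + ir, ¬ "Device".toList <+: (a ++ ' ' :: r).drop i := by
    intro i hi hp
    by_cases h6 : i + 6 ≤ a.length
    · exact hDa' i (prefix_down a r i h6 hp)
    · by_cases hle : i ≤ a.length
      · exact no_straddle a r ha i hle (by omega) hp
      · have : (a ++ ' ' :: r).drop i = r.drop (i - a.length - 1) := by
          have h := drop_past a r (i - a.length - 1)
          rw [show a.length + 1 + (i - a.length - 1) = i by omega] at h
          exact h
        rw [this] at hp
        exact hmin (i - a.length - 1) (by omega) hp
  rw [find_eq_of _ _ _ hocc hminL]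
  omega

-- "Device" occurring in a ++ ' ' :: r but not in a occurs in r
theorem infix_right (a r : List Char) (ha : ' ' ∉ a) (hDa : ¬ "Device".toList <:+: a)
    (hD : "Device".toList <:+: (a ++ ' ' :: r)) : "Device".toList <:+: r := by
  obtain ⟨p, q, hpq⟩ := hD
  have hocc : "Device".toList <+: (a ++ ' ' :: r).drop p.length := by
    exact ⟨q, by rw [← hpq]; simp⟩
  by_cases h6 : p.length + 6 ≤ a.length
  · exact absurd (prefix_drop_infix a _ _ (prefix_down a r _ h6 hocc)) hDa
  · by_cases hle : p.length ≤ a.length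
    · exact absurd hocc (no_straddle a r ha _ hle (by omega))
    · have : (a ++ ' ' :: r).drop p.length = r.drop (p.length - a.length - 1) := by
        have h := drop_past a r (p.length - a.length - 1)
        rw [show a.length + 1 + (p.length - a.length - 1) = p.length by omega] at h
        exact h
      rw [this] at hocc
      exact prefix_drop_infix r _ _ hocc

-- spaceless lists stay spaceless under drop
theorem drop_no_space (a : List Char) (ha : ' ' ∉ a) (k : Nat) : ' ' ∉ a.drop k :=
  fun h => ha ((List.drop_subset _ _) h)

-- ===== the main induction =====

theorem core_eq (n : Nat) : ∀ l : List Char, l.length ≤ n →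
    pvAcore l = pvScanTokens (PySem.Chars.splitOn l [' ']) := by
  induction n with
  | zero =>
    intro l hl
    have : l = [] := List.eq_nil_of_length_eq_zero (by omega)
    subst this
    decide
  | succ n ih =>
    intro l hl
    rcases space_decomp l with hns | ⟨a, r, rfl, ha⟩
    · -- single token
      rw [splitOn_no_space l hns]
      by_cases hD : "Device".toList <:+: l
      · have hnn : 0 ≤ PySem.Chars.find l "Device".toList :=
          (PySem.Chars.find_nonneg_iff _ _).mpr hD
        obtain ⟨hpre, _⟩ := PySem.Chars.find_spec (s := l) (sub := "Device".toList) hnn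
        unfold pvAcore
        rw [if_neg (by omega), if_pos (by omega)]
        have hsplit : PySem.Chars.splitOnMax
            (l.drop (PySem.Chars.find l "Device".toList).toNat) [' '] 2
            = [l.drop (PySem.Chars.find l "Device".toList).toNat] := by
          have := splitOnMax_one (l.drop (PySem.Chars.find l "Device".toList).toNat) []
            (drop_no_space l hns _) (by simp)
          simpa using this
        rw [hsplit]
        have his := (PySem.Chars.isIn_iff_infix "Device".toList l).mpr hD
        simp [pvScanTokens]
      · unfold pvAcore
        rw [if_pos (PySem.Chars.find_eq_neg_one_iff _ _ |>.mpr hD)]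
        have his : PySem.Chars.isIn ['D','e','v','i','c','e'] l = false := by
          simpa using (PySem.Chars.isIn_eq_false_iff "Device".toList l).mpr hD
        simp [pvScanTokens, his]
    · -- l = a ++ ' ' :: r
      rw [splitOn_cons a r ha]
      have hrlen : r.length ≤ n := by simp at hl; omega
      by_cases hDa : "Device".toList <:+: a
      · -- found in the first token
        have hnn : 0 ≤ PySem.Chars.find a "Device".toList :=
          (PySem.Chars.find_nonneg_iff _ _).mpr hDa
        obtain ⟨hpre, _⟩ := PySem.Chars.find_spec (s := a) (sub := "Device".toList) hnn
        set ia := (PySem.Chars.find a "Device".toList).toNat with hia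
        have hfind := find_left a r ha hDa
        have hdropA : a.drop ia = "Device".toList ++ a.drop (ia + 6) := tail_eq ia a hpre
        have htns : ' ' ∉ a.drop (ia + 6) := drop_no_space a ha _
        have hdropL : (a ++ ' ' :: r).drop ia
            = "Device".toList ++ (a.drop (ia + 6) ++ ' ' :: r) := by
          have hle : ia ≤ a.length := by
            have := hpre.length_le; simp at this; omega
          rw [List.drop_append_of_le_length hle, hdropA]
          simp
        unfold pvAcore
        rw [hfind]
        rw [if_neg (by omega), if_pos (by omega), ← hia, hdropL]
        have his' : PySem.Chars.isIn ['D','e','v','i','c','e'] a = true := by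
          simpa using (PySem.Chars.isIn_iff_infix "Device".toList a).mpr hDa
        rcases space_decomp r with hr | ⟨b, r2, rfl, hb⟩
        · -- only two fields
          rw [splitOnMax_two _ _ _ dev_no_space htns hr, splitOn_no_space r hr]
          simp [pvScanTokens, his']
        · -- three fields
          rw [splitOnMax_three _ _ _ _ dev_no_space htns hb, splitOn_cons b r2 hb]
          obtain ⟨hne, hjoin⟩ := join_splitOn_aux n r2 (by simp at hrlen; omega)
          obtain ⟨x, xs, hx⟩ := List.exists_cons_of_ne_nil hne
          rw [hx] at hjoin
          rw [hx]
          simp [pvScanTokens, his', ← hjoin]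
      · -- not in the first token: both sides reduce to r
        have hscan : pvScanTokens (a :: PySem.Chars.splitOn r [' '])
            = pvScanTokens (PySem.Chars.splitOn r [' ']) := by
          have hisf : PySem.Chars.isIn ['D','e','v','i','c','e'] a = false := by
            simpa using (PySem.Chars.isIn_eq_false_iff "Device".toList a).mpr hDa
          simp [pvScanTokens, hisf]
        rw [hscan, ← ih r hrlen]
        by_cases hD : "Device".toList <:+: (a ++ ' ' :: r)
        · have hDr : "Device".toList <:+: r := infix_right a r ha hDa hD
          have hnnr : 0 ≤ PySem.Chars.find r "Device".toList :=
            (PySem.Chars.find_nonneg_iff _ _).mpr hDr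
          have hfind := find_right a r ha hDa hDr
          have hdrop : (a ++ ' ' :: r).drop
              ((a.length : Int) + 1 + PySem.Chars.find r "Device".toList).toNat
              = r.drop (PySem.Chars.find r "Device".toList).toNat := by
            rw [show ((a.length : Int) + 1 + PySem.Chars.find r "Device".toList).toNat
                = a.length + 1 + (PySem.Chars.find r "Device".toList).toNat by omega]
            exact drop_past a r _
          unfold pvAcore
          rw [hfind, hdrop]
          have h1 : ¬ ((a.length : Int) + 1 + PySem.Chars.find r "Device".toList = -1) := by omega
          have h2 : (a.length : Int) + 1 + PySem.Chars.find r "Device".toList > -1 := by omega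
          have h3 : ¬ (PySem.Chars.find r "Device".toList = -1) := by omega
          have h4 : PySem.Chars.find r "Device".toList > -1 := by omega
          rw [if_neg h1, if_pos h2, if_neg h3, if_pos h4]
        · have hDr : ¬ "Device".toList <:+: r :=
            fun h => hD (h.trans ⟨a ++ [' '], [], by simp⟩)
          unfold pvAcore
          rw [if_pos (PySem.Chars.find_eq_neg_one_iff _ _ |>.mpr hD),
            if_pos (PySem.Chars.find_eq_neg_one_iff _ _ |>.mpr hDr)]

-- ===== VERDICT (by name: the statement is the Claim_ definition above) =====
theorem parse_device_info_spec : Claim_equal_parse_device_info := by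
  intro info_string _hdom
  unfold Spec_parse_device_info parse_device_info parse_device_info_alt
  set l := info_string.toList with hl
  simp only [List.any_cons, List.any_nil, Bool.or_false]
  cases hblk : (PySem.Chars.isIn "[\x1b[0;".toList l || PySem.Chars.isIn "removed".toList l) with
  | true => simp
  | false =>
    rw [if_pos (show (!false) = true by decide), if_neg (show ¬ (false = true) by decide)]
    exact core_eq l.length l (le_refl _)
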